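-- pv_equiv track=rewrite | github.com/Treeki/CylindricalEarth | build_specs.py | analyse_value
-- ===== SOURCE A (Python) =====
-- def analyse_value(key, value):
-- 	maybe_string = True
-- 	seen_zero = False
-- 	nonzero_bytes = 0
--
-- 	for index, byte in enumerate(value):
-- 		if byte > 0:
-- 			nonzero_bytes = index + 1
--
-- 			if seen_zero:
-- 				# non-zero char after a zero means this can't be a string
-- 				maybe_string = False
-- 			else:
-- 				# unprintable char means this can't be a string
-- 				if byte < 0x20:
-- 					maybe_string = False
-- 		else:
-- 			seen_zero = True
--
-- 	return maybe_string, nonzero_bytes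
-- ===== SOURCE B (Python) =====
-- def analyse_value(key, value):
-- 	n = len(value)
-- 	while n > 0 and value[n - 1] <= 0:
-- 		n -= 1
-- 	return all(b >= 0x20 for b in value[:n]), n
-- ===== Notes on version B (the rewrite author's own statement) =====
-- stated objective: simpler
-- what changed: Replaces the fused single pass with its maybe_string/seen_zero state machine by two plain passes: trim trailing non-positive bytes from the end to get nonzero_bytes, then test that the whole remaining prefix is printable (>= 0x20), which is equivalent because any non-positive byte before the last positive one already falls below 0x20.
import Mathlib
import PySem

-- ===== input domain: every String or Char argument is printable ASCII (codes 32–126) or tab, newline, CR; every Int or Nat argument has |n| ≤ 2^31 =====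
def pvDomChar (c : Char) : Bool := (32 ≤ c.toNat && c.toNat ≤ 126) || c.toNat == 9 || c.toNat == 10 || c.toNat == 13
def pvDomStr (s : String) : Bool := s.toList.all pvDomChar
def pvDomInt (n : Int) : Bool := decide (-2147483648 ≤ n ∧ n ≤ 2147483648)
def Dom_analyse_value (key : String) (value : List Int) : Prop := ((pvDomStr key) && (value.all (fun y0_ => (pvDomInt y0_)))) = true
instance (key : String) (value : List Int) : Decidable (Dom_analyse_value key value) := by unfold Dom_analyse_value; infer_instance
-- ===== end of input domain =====

-- B replaces A's fused pass (maybe_string/seen_zero state machine) by two plain passes: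
-- trim trailing non-positive bytes to get nonzero_bytes, then check the prefix is all printable.

-- ===== PORT A =====
-- literal port of A: one fold over enumerate(value) carrying (maybe_string, seen_zero, nonzero_bytes)
def analyse_value (key : String) (value : List Int) : Bool × Int :=
  let st := (PySem.List.enumerate value).foldl
    (fun (st : Bool × Bool × Int) (p : Int × Int) =>
      let (maybe_string, seen_zero, nonzero_bytes) := st
      if p.2 > 0 then
        let nonzero_bytes := p.1 + 1
        if seen_zero then (false, seen_zero, nonzero_bytes)
        else if p.2 < 0x20 then (false, seen_zero, nonzero_bytes)
        else (maybe_string, seen_zero, nonzero_bytes)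
      else (maybe_string, true, nonzero_bytes))
    (true, false, 0)
  (st.1, st.2.2)

-- ===== PORT B =====
-- 'while n > 0 and value[n-1] <= 0: n -= 1' ported as structural recursion over the reversed list
def pvTrim : List Int → Nat
  | [] => 0
  | b :: t => if b ≤ 0 then pvTrim t else t.length + 1

def analyse_value_alt (key : String) (value : List Int) : Bool × Int :=
  let n := pvTrim value.reverse
  ((value.take n).all (fun b => decide (0x20 ≤ b)), (n : Int))

-- ===== PRECONDITION & SPEC =====
def Spec_analyse_value (key : String) (value : List Int) (out : Bool × Int) : Prop := out = analyse_value_alt key value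
instance (key : String) (value : List Int) (out : Bool × Int) : Decidable (Spec_analyse_value key value out) := by unfold Spec_analyse_value; infer_instance

-- ===== CLAIM (what is proved, stated in full; the proofs are below) =====
def Claim_equal_analyse_value : Prop := ∀ (key : String) (value : List Int), Dom_analyse_value key value → Spec_analyse_value key value (analyse_value key value)

-- ===== LEMMAS AND PROOFS =====

-- n = pvTrim value.reverse never exceeds the length
theorem pvTrim_le (l : List Int) : pvTrim l ≤ l.length := by
  induction l with
  | nil => simp [pvTrim]
  | cons b t ih => simp only [pvTrim, List.length_cons]; split <;> omega

-- seen_zero component spec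
def pvSZ (l : List Int) : Bool := l.any (fun b => decide (b ≤ 0))

-- B's two components as functions of the list
def pvN (l : List Int) : Nat := pvTrim l.reverse
def pvMS (l : List Int) : Bool := (l.take (pvN l)).all (fun b => decide (0x20 ≤ b))

theorem pvN_append_nonpos (l : List Int) (b : Int) (hb : b ≤ 0) :
    pvN (l ++ [b]) = pvN l := by
  simp [pvN, pvTrim, hb]

theorem pvN_append_pos (l : List Int) (b : Int) (hb : ¬ b ≤ 0) :
    pvN (l ++ [b]) = l.length + 1 := by
  simp [pvN, pvTrim, hb]

theorem pvMS_append_nonpos (l : List Int) (b : Int) (hb : b ≤ 0) :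
    pvMS (l ++ [b]) = pvMS l := by
  unfold pvMS
  rw [pvN_append_nonpos l b hb, List.take_append_of_le_length]
  exact le_trans (by simpa [pvN] using pvTrim_le l.reverse) (le_refl _)

theorem pvMS_append_pos (l : List Int) (b : Int) (hb : ¬ b ≤ 0) :
    pvMS (l ++ [b]) = (l.all (fun x => decide (0x20 ≤ x)) && decide (0x20 ≤ b)) := by
  unfold pvMS
  rw [pvN_append_pos l b hb]
  have : (l ++ [b]).take (l.length + 1) = l ++ [b] := by
    apply List.take_of_length_le; simp
  rw [this]; simp

-- if all bytes of l are printable then no byte is ≤ 0 and the trim removes nothing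
theorem pvall_imp (l : List Int) (h : l.all (fun x => decide (0x20 ≤ x)) = true) :
    pvSZ l = false ∧ pvN l = l.length := by
  constructor
  · simp only [pvSZ, List.any_eq_false]
    intro b hb
    have := (List.all_eq_true.mp h) b hb
    simp at this ⊢; omega
  · have : ∀ m : List Int, m.all (fun x => decide (0x20 ≤ x)) = true → pvTrim m = m.length := by
      intro m hm
      cases m with
      | nil => rfl
      | cons b t =>
        have hb := (List.all_eq_true.mp hm) b (by simp)
        simp at hb
        simp [pvTrim, show ¬ b ≤ 0 by omega]
    have hrev : l.reverse.all (fun x => decide (0x20 ≤ x)) = true := by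
      simp only [List.all_eq_true] at h ⊢; intro b hb; exact h b (List.mem_reverse.mp hb)
    simpa [pvN, this l.reverse hrev]

-- if some byte of l is ≤ 0 then l.all printable is false
theorem pvsz_imp (l : List Int) (h : pvSZ l = true) :
    l.all (fun x => decide (0x20 ≤ x)) = false := by
  simp only [pvSZ, List.any_eq_true] at h
  obtain ⟨b, hb, hle⟩ := h
  simp only [List.all_eq_false]
  exact ⟨b, hb, by simp at hle ⊢; omega⟩

-- key bridge: printable-everywhere equals pvMS && not pvSZ
theorem pvall_eq (l : List Int) :
    l.all (fun x => decide (0x20 ≤ x)) = (pvMS l && !pvSZ l) := by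
  cases hsz : pvSZ l with
  | true => simp [pvsz_imp l hsz]
  | false =>
    cases hall : l.all (fun x => decide (0x20 ≤ x)) with
    | true =>
      have := (pvall_imp l hall).2
      simp [pvMS, this, hall]
    | false =>
      -- some byte is not printable; since pvSZ l = false all bytes are > 0, so pvN l = l.length
      have hpos : ∀ b ∈ l, 0 < b := by
        simp only [pvSZ, List.any_eq_false] at hsz
        intro b hb; have := hsz b hb; simp at this; omega
      have hn : pvN l = l.length := by
        have : ∀ m : List Int, (∀ b ∈ m, 0 < b) → pvTrim m = m.length := by
          intro m hm
          cases m with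
          | nil => rfl
          | cons b t =>
            have := hm b (by simp)
            simp [pvTrim, show ¬ b ≤ 0 by omega]
        have := this l.reverse (fun b hb => hpos b (List.mem_reverse.mp hb))
        simpa [pvN] using this
      simp [pvMS, hn, hall]

-- A's fold state over l ++ [b] (reverse induction backbone)
theorem pvA_loop (l : List Int) :
    (PySem.List.enumerate l).foldl
      (fun (st : Bool × Bool × Int) (p : Int × Int) =>
        let (maybe_string, seen_zero, nonzero_bytes) := st
        if p.2 > 0 then
          let nonzero_bytes := p.1 + 1
          if seen_zero then (false, seen_zero, nonzero_bytes)
          else if p.2 < 0x20 then (false, seen_zero, nonzero_bytes)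
          else (maybe_string, seen_zero, nonzero_bytes)
        else (maybe_string, true, nonzero_bytes))
      (true, false, 0)
    = (pvMS l, pvSZ l, (pvN l : Int)) := by
  induction l using List.reverseRecOn with
  | nil => simp [pvMS, pvSZ, pvN, pvTrim]
  | append_singleton l b ih =>
    rw [PySem.List.enumerate_append, List.foldl_append, ih]
    by_cases hb : b ≤ 0
    · have hnb : ¬ b > 0 := by omega
      simp only [PySem.List.enumerate_cons, PySem.List.enumerate_nil, List.foldl_cons,
        List.foldl_nil, hnb, if_false]
      rw [pvMS_append_nonpos l b hb, pvN_append_nonpos l b hb]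
      simp only [pvSZ, List.any_append, List.any_cons, List.any_nil]
      simp [hb]
    · have hpb : b > 0 := by omega
      simp only [PySem.List.enumerate_cons, PySem.List.enumerate_nil, List.foldl_cons,
        List.foldl_nil, hpb, if_true]
      rw [pvMS_append_pos l b hb, pvN_append_pos l b hb]
      have hsz : pvSZ (l ++ [b]) = pvSZ l := by simp [pvSZ]; omega
      rw [hsz]
      by_cases hlt : b < 0x20
      · have : decide (0x20 ≤ b) = false := by simp; omega
        cases hszl : pvSZ l <;> simp [hlt, this, pvall_eq l, hszl]
      · have hdec : decide (0x20 ≤ b) = true := by simp; omega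
        cases hszl : pvSZ l <;> simp [hlt, hdec, pvall_eq l, hszl]

-- ===== VERDICT (by name: the statement is the Claim_ definition above) =====
theorem analyse_value_spec : Claim_equal_analyse_value := by
  intro key value _
  unfold Spec_analyse_value analyse_value analyse_value_alt
  rw [pvA_loop value]
  simp [pvMS, pvN]
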